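-- pv_equiv track=rewrite | github.com/errantsky/bioinformatics-assignments | hw2/dna-alignment.py | score_alignments
-- ===== SOURCE A (Python) =====
-- def score_alignments(str1, str2, str3):
--     match_score = 1
--     mismatch_score = -2
--     gap_penalty = -3
--
--     gap_count = 0
--     mismatch_count = 0
--     match_count = 0
--
--     aligned_strs = [str1, str2, str3]
--
--     for i in range(len(str1)):
--         for strand in aligned_strs:
--             if strand[i] == '-':
--                 gap_count += 1
--
--         char1 = str1[i]
--         char2 = str2[i]
--         char3 = str3[i]
--
--         if not (char1 == '-' or char2 == '-'):
--             if char1 == char2: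
--                 match_count += 1
--             else:
--                 mismatch_count += 1
--
--         if not (char1 == '-' or char3 == '-'):
--             if char1 == char3:
--                 match_count += 1
--             else:
--                 mismatch_count += 1
--
--         if not (char2 == '-' or char3 == '-'):
--             if char2 == char3:
--                 match_count += 1
--             else:
--                 mismatch_count += 1
--
--     overall_score = match_count * match_score + mismatch_count * mismatch_score + gap_count * gap_penalty
--     return overall_score
-- ===== SOURCE B (Python) =====
-- def score_alignments(str1, str2, str3):
--     score = 0
--     for i in range(len(str1)):
--         non = [c for c in (str1[i], str2[i], str3[i]) if c != '-']
--         m = len(non)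
--         pairs = m * (m - 1) // 2
--         matches = sum(non.count(c) - 1 for c in non) // 2
--         score += matches - 2 * (pairs - matches) - 3 * (3 - m)
--     return score
-- ===== Notes on version B (the rewrite author's own statement) =====
-- stated objective: alternative
-- what changed: Replaces A's three explicit pairwise match/mismatch comparisons and separate gap/mismatch/match counters per column with pair combinatorics: among the m non-gap characters of each column, evaluated pairs = C(m,2) and matches = sum of C(mult,2) per character (computed via per-element count), mismatches by subtraction, summing a single running score.
import Mathlib
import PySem

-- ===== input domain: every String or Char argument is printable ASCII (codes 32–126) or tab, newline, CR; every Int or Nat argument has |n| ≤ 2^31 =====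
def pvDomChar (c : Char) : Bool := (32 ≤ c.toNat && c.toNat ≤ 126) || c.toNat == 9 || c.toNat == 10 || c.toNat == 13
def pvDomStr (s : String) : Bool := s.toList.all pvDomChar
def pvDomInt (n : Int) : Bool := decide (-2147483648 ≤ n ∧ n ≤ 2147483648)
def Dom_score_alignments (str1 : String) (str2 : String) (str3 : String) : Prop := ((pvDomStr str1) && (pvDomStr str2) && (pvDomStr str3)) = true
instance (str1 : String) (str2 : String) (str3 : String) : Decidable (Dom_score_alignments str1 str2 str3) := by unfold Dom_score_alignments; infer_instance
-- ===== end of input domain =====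

-- B replaces A's three explicit pairwise comparisons per column by pair combinatorics
-- (C(m,2) evaluated pairs among the m non-gap characters, mats counted via per-char
-- multiplicities); objective: alternative decomposition, same O(n) cost.

-- ===== PORT A =====
def score_alignments (str1 : String) (str2 : String) (str3 : String) : Int :=
  let l1 := str1.toList
  let l2 := str2.toList
  let l3 := str3.toList
  let st := (List.range l1.length).foldl (fun (st : Int × Int × Int) (i : Nat) =>
    let gap := st.1; let mis := st.2.1; let mat := st.2.2
    -- 'for strand in aligned_strs: if strand[i] == '-': gap_count += 1'
    let gap := [l1, l2, l3].foldl
      (fun g s => if (PySem.List.pyGet? s (i : Int)).getD '?' = '-' then g + 1 else g) gap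
    let c1 := (PySem.List.pyGet? l1 (i : Int)).getD '?'
    let c2 := (PySem.List.pyGet? l2 (i : Int)).getD '?'
    let c3 := (PySem.List.pyGet? l3 (i : Int)).getD '?'
    let p12 := if ¬(c1 = '-' ∨ c2 = '-') then
        (if c1 = c2 then (mis, mat + 1) else (mis + 1, mat)) else (mis, mat)
    let p13 := if ¬(c1 = '-' ∨ c3 = '-') then
        (if c1 = c3 then (p12.1, p12.2 + 1) else (p12.1 + 1, p12.2)) else p12
    let p23 := if ¬(c2 = '-' ∨ c3 = '-') then
        (if c2 = c3 then (p13.1, p13.2 + 1) else (p13.1 + 1, p13.2)) else p13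
    (gap, p23.1, p23.2)) ((0, 0, 0) : Int × Int × Int)
  st.2.2 * 1 + st.2.1 * (-2) + st.1 * (-3)

-- ===== PORT B =====
def score_alignments_alt (str1 : String) (str2 : String) (str3 : String) : Int :=
  let l1 := str1.toList
  let l2 := str2.toList
  let l3 := str3.toList
  (List.range l1.length).foldl (fun (score : Int) (i : Nat) =>
    let non := [(PySem.List.pyGet? l1 (i : Int)).getD '?',
                (PySem.List.pyGet? l2 (i : Int)).getD '?',
                (PySem.List.pyGet? l3 (i : Int)).getD '?'].filter (fun c => c ≠ '-')
    let m : Int := non.length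
    let pairs := PySem.Int.floordiv (m * (m - 1)) 2
    let mats := PySem.Int.floordiv
      (non.foldl (fun s c => s + ((PySem.List.count non c : Int) - 1)) 0) 2
    score + (mats - 2 * (pairs - mats) - 3 * (3 - m))) 0

-- ===== PRECONDITION & SPEC =====
-- A raises IndexError when str2 or str3 is shorter than str1 (so does B); Pre_ excludes exactly those.
def Pre_score_alignments (str1 : String) (str2 : String) (str3 : String) : Prop :=
  str1.length ≤ str2.length ∧ str1.length ≤ str3.length
instance (str1 : String) (str2 : String) (str3 : String) : Decidable (Pre_score_alignments str1 str2 str3) := by unfold Pre_score_alignments; infer_instance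
def pvWitness_score_alignments : String × String × String := ("AC-", "A-G", "ACG")

def Spec_score_alignments (str1 : String) (str2 : String) (str3 : String) (out : Int) : Prop := out = score_alignments_alt str1 str2 str3
instance (str1 : String) (str2 : String) (str3 : String) (out : Int) : Decidable (Spec_score_alignments str1 str2 str3 out) := by unfold Spec_score_alignments; infer_instance

-- ===== CLAIM (what is proved, stated in full; the proofs are below) =====
def Claim_equal_score_alignments : Prop := ∀ (str1 : String) (str2 : String) (str3 : String), Dom_score_alignments str1 str2 str3 → Pre_score_alignments str1 str2 str3 → Spec_score_alignments str1 str2 str3 (score_alignments str1 str2 str3)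

-- ===== LEMMAS AND PROOFS =====

-- Generic fold correspondence: B's accumulator is the image of A's state.
theorem pv_foldl_rel {α β γ : Type} (l : List γ) (fA : α → γ → α) (fB : β → γ → β)
    (f : α → β) (h : ∀ a c, c ∈ l → f (fA a c) = fB (f a) c) :
    ∀ a, f (l.foldl fA a) = l.foldl fB (f a) := by
  induction l with
  | nil => intro a; rfl
  | cons x xs ih =>
    intro a
    simp only [List.foldl_cons]
    rw [← h a x (by simp)]
    exact ih (fun a c hc => h a c (by simp [hc])) _

-- Per-column correspondence, on arbitrary characters.
theorem pv_step (c1 c2 c3 : Char) (g mi ma : Int) :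
    (let gap := [c1, c2, c3].foldl (fun g c => if c = '-' then g + 1 else g) g
     let p12 := if ¬(c1 = '-' ∨ c2 = '-') then
        (if c1 = c2 then (mi, ma + 1) else (mi + 1, ma)) else (mi, ma)
     let p13 := if ¬(c1 = '-' ∨ c3 = '-') then
        (if c1 = c3 then (p12.1, p12.2 + 1) else (p12.1 + 1, p12.2)) else p12
     let p23 := if ¬(c2 = '-' ∨ c3 = '-') then
        (if c2 = c3 then (p13.1, p13.2 + 1) else (p13.1 + 1, p13.2)) else p13
     p23.2 * 1 + p23.1 * (-2) + gap * (-3))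
    = (ma * 1 + mi * (-2) + g * (-3)) +
      (let non := [c1, c2, c3].filter (fun c => c ≠ '-')
       let m : Int := non.length
       let pairs := PySem.Int.floordiv (m * (m - 1)) 2
       let mats := PySem.Int.floordiv
         (non.foldl (fun s c => s + ((PySem.List.count non c : Int) - 1)) 0) 2
       mats - 2 * (pairs - mats) - 3 * (3 - m)) := by
  by_cases h1 : c1 = '-' <;> by_cases h2 : c2 = '-' <;> by_cases h3 : c3 = '-' <;>
    by_cases h12 : c1 = c2 <;> by_cases h13 : c1 = c3 <;> by_cases h23 : c2 = c3 <;>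
    simp_all [List.filter, eq_comm] <;> ring

-- ===== VERDICT (by name: the statement is the Claim_ definition above) =====
theorem score_alignments_spec : Claim_equal_score_alignments := by
  intro str1 str2 str3 _ _
  unfold Spec_score_alignments score_alignments score_alignments_alt
  have h := pv_foldl_rel (List.range str1.toList.length)
      (fun (st : Int × Int × Int) (i : Nat) =>
        let gap := st.1; let mis := st.2.1; let mat := st.2.2
        let gap := [str1.toList, str2.toList, str3.toList].foldl
          (fun g s => if (PySem.List.pyGet? s (i : Int)).getD '?' = '-' then g + 1 else g) gap
        let c1 := (PySem.List.pyGet? str1.toList (i : Int)).getD '?'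
        let c2 := (PySem.List.pyGet? str2.toList (i : Int)).getD '?'
        let c3 := (PySem.List.pyGet? str3.toList (i : Int)).getD '?'
        let p12 := if ¬(c1 = '-' ∨ c2 = '-') then
            (if c1 = c2 then (mis, mat + 1) else (mis + 1, mat)) else (mis, mat)
        let p13 := if ¬(c1 = '-' ∨ c3 = '-') then
            (if c1 = c3 then (p12.1, p12.2 + 1) else (p12.1 + 1, p12.2)) else p12
        let p23 := if ¬(c2 = '-' ∨ c3 = '-') then
            (if c2 = c3 then (p13.1, p13.2 + 1) else (p13.1 + 1, p13.2)) else p13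
        (gap, p23.1, p23.2))
      (fun (score : Int) (i : Nat) =>
        let non := [(PySem.List.pyGet? str1.toList (i : Int)).getD '?',
                    (PySem.List.pyGet? str2.toList (i : Int)).getD '?',
                    (PySem.List.pyGet? str3.toList (i : Int)).getD '?'].filter (fun c => c ≠ '-')
        let m : Int := non.length
        let pairs := PySem.Int.floordiv (m * (m - 1)) 2
        let mats := PySem.Int.floordiv
          (non.foldl (fun s c => s + ((PySem.List.count non c : Int) - 1)) 0) 2
        score + (mats - 2 * (pairs - mats) - 3 * (3 - m)))
      (fun (st : Int × Int × Int) => st.2.2 * 1 + st.2.1 * (-2) + st.1 * (-3))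
      (fun a i _ => by
        simpa only [List.foldl_cons, List.foldl_nil] using pv_step _ _ _ a.1 a.2.1 a.2.2)
      (0, 0, 0)
  simpa using h
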